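-- pv_equiv track=rewrite | github.com/DrakeSeteraO/Block-Blast-Best-Move-Solver | BlockBlastAI.py | place_locations
-- ===== SOURCE A (Python) =====
-- def place_locations(board: list, piece: list) -> list:
--     locations = list()
--     section = [[0 for i in range(len(piece[0]))] for j in range(len(piece))]
--
--     xp = 0
--     yp = 0
--     while yp <= len(board) - len(piece) and xp <= len(board[yp]) - len(piece[0]):
--
--         section = copy_section(board, section, xp, yp)
--         valid_loc = check_location(section, piece)
--         if valid_loc:
--             locations.append([xp,yp])
--
--         xp += 1
--         if xp >= len(board[yp]) - len(piece[0]) + 1: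
--             xp = 0
--             yp += 1
--
--     return locations
--
-- def copy_section(board: list, section: list, xp: int, yp: int) -> list:
--     for y in range(len(section)):
--         for x in range(len(section[y])):
--             section[y][x] = board[yp+y][xp+x]
--     return section
--
-- def check_location(board_spot: list, piece: list) -> bool:
--     for y in range(len(piece)):
--         for x in range(len(piece[y])):
--             if piece[y][x] == 1 and board_spot[y][x] == 1:
--                 return False
--     return True
-- ===== SOURCE B (Python) =====
-- def place_locations(board: list, piece: list) -> list:
--     offs = [(y, x) for y, row in enumerate(piece) for x, v in enumerate(row) if v == 1]
--     h, w = len(piece), len(piece[0])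
--     locations = []
--     for yp in range(len(board) - h + 1):
--         for xp in range(len(board[yp]) - w + 1):
--             if all(board[yp + y][xp + x] != 1 for y, x in offs):
--                 locations.append([xp, yp])
--     return locations
-- ===== Notes on version B (the rewrite author's own statement) =====
-- stated objective: simpler
-- what changed: Replaces the single manually-advanced while loop with a mutable section buffer (copy_section + check_location scanning a full h*w window per position) by a precomputed list of the piece's filled-cell offsets and two plain nested for-loops that test only those offsets per position.
-- outside the precondition, e.g. on place_locations([[0, 0], [0], [0, 0]], [[1, 1]]): A returns [[0, 0]], B returns [[0, 0], [0, 2]]; on place_locations([[0]], [[1], [0, 0]]): A returns [], B returns []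
import Mathlib
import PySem

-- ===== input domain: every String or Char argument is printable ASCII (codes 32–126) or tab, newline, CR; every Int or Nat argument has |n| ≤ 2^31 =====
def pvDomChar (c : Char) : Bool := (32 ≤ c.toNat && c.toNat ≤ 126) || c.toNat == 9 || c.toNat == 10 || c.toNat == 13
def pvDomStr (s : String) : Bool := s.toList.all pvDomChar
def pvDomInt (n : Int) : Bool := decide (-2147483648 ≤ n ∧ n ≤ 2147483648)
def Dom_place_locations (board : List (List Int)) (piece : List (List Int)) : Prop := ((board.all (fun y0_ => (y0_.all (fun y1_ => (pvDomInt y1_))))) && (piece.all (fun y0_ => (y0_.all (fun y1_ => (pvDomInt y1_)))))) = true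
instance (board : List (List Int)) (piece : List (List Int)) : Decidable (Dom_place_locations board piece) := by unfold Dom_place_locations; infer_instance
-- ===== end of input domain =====

-- B replaces A's manually-advanced while loop with section buffer by precomputed filled-cell
-- offsets and two nested loops (objective: simpler).


-- ===== PORT A =====
-- board[y][x]; an out-of-range access (Python IndexError) yields the default 0 — reached only outside Pre_
def aCell (board : List (List Int)) (y x : Int) : Int :=
  (PySem.List.pyGet? ((PySem.List.pyGet? board y).getD []) x).getD 0

-- for y in range(len(section)): for x in range(len(section[y])): section[y][x] = board[yp+y][xp+x]
def copy_section (board : List (List Int)) (sect : List (List Int)) (xp yp : Int) : List (List Int) :=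
  (List.range sect.length).foldl (fun sec y =>
    (List.range (sec.getD y []).length).foldl (fun s x =>
      s.set y ((s.getD y []).set x (aCell board (yp + y) (xp + x)))) sec) sect

-- early 'return False' on the first clash = boolean 'all' over the same nested index loops
def check_location (board_spot : List (List Int)) (piece : List (List Int)) : Bool :=
  (List.range piece.length).all (fun y =>
    (List.range (piece.getD y []).length).all (fun x =>
      !((piece.getD y []).getD x 0 == 1 && (board_spot.getD y []).getD x 0 == 1)))

-- the while loop; fuel only makes the recursion total, inside Pre_ it never runs out
def placeLoop (board piece : List (List Int)) : Nat → Int → Int → List (List Int) → List (List Int) → List (List Int)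
  | 0, _, _, _, acc => acc
  | fuel+1, xp, yp, sec, acc =>
    if (yp ≤ (board.length : Int) - piece.length ∧
        xp ≤ ((((PySem.List.pyGet? board yp).getD []).length : Int) - ((piece.headD []).length : Int))) then
      let sec' := copy_section board sec xp yp
      let acc' := if check_location sec' piece then acc ++ [[xp, yp]] else acc
      let xp' := xp + 1
      if xp' ≥ (((PySem.List.pyGet? board yp).getD []).length : Int) - ((piece.headD []).length : Int) + 1 then
        placeLoop board piece fuel 0 (yp + 1) sec' acc'
      else
        placeLoop board piece fuel xp' yp sec' acc'
    else acc

def place_locations (board : List (List Int)) (piece : List (List Int)) : List (List Int) :=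
  -- section = [[0]*len(piece[0])]*len(piece)]; len(piece[0]) on empty piece (IndexError) defaults — outside Pre_
  let sec0 : List (List Int) :=
    (List.range piece.length).map (fun _ => (List.range (piece.headD []).length).map (fun _ => (0 : Int)))
  placeLoop board piece ((board.length + 1) * ((board.map List.length).sum + 2) + 1) 0 0 sec0 []

-- ===== PORT B =====
def bCell (board : List (List Int)) (y x : Int) : Int :=
  (PySem.List.pyGet? ((PySem.List.pyGet? board y).getD []) x).getD 0

-- offs = [(y, x) for y, row in enumerate(piece) for x, v in enumerate(row) if v == 1]
def piece_offsets (piece : List (List Int)) : List (Int × Int) :=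
  (PySem.List.enumerate piece 0).flatMap (fun yr =>
    (PySem.List.enumerate yr.2 0).filterMap (fun xv => if xv.2 == 1 then some (yr.1, xv.1) else none))

def place_locations_alt (board : List (List Int)) (piece : List (List Int)) : List (List Int) :=
  let offs := piece_offsets piece
  let h : Int := piece.length
  let w : Int := ((piece.headD []).length : Int)  -- len(piece[0]); IndexError on empty piece defaults — outside Pre_
  (PySem.List.pyRange 0 ((board.length : Int) - h + 1) 1).foldl (fun locs yp =>
    (PySem.List.pyRange 0 ((((PySem.List.pyGet? board yp).getD []).length : Int) - w + 1) 1).foldl (fun locs2 xp =>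
      if offs.all (fun o => bCell board (yp + o.1) (xp + o.2) != 1) then locs2 ++ [[xp, yp]] else locs2) locs) []

-- ===== PRECONDITION & SPEC =====
-- Pre_ excludes: the empty piece (A raises IndexError on len(piece[0])); pieces with a row longer than the
-- first (check_location raises IndexError whenever such a cell holds 1); and boards where, in the scanned
-- band of start rows, some row is shorter than the piece's first row or a row shrinks inside the piece
-- window (there A raises IndexError in copy_section or silently stops scanning at the first short row,
-- an artefact of its single while loop) — such ragged boards are outside the square-board domain A serves.
def Pre_place_locations (board : List (List Int)) (piece : List (List Int)) : Prop :=
  piece ≠ [] ∧ (∀ r ∈ piece, r.length ≤ (piece.headD []).length) ∧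
    (∀ yp, yp < board.length + 1 - piece.length →
      (piece.headD []).length ≤ (board.getD yp []).length ∧
      ∀ y, y < piece.length → (board.getD yp []).length ≤ (board.getD (yp + y) []).length)
instance (board : List (List Int)) (piece : List (List Int)) : Decidable (Pre_place_locations board piece) := by
  unfold Pre_place_locations; infer_instance

def pvWitness_place_locations : List (List Int) × List (List Int) := ([[0, 0], [0, 1]], [[1]])

def Spec_place_locations (board : List (List Int)) (piece : List (List Int)) (out : List (List Int)) : Prop := out = place_locations_alt board piece
instance (board : List (List Int)) (piece : List (List Int)) (out : List (List Int)) : Decidable (Spec_place_locations board piece out) := by unfold Spec_place_locations; infer_instance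

-- ===== CLAIM (what is proved, stated in full; the proofs are below) =====
def Claim_equal_place_locations : Prop := ∀ (board : List (List Int)) (piece : List (List Int)), Dom_place_locations board piece → Pre_place_locations board piece → Spec_place_locations board piece (place_locations board piece)

-- ===== LEMMAS AND PROOFS =====

def cellN (board : List (List Int)) (y x : Nat) : Int := (board.getD y []).getD x 0

def newRow (board : List (List Int)) (xp yp y w : Nat) : List Int :=
  (List.range w).map (fun x => cellN board (yp + y) (xp + x))

def sectionAt (board : List (List Int)) (xp yp h w : Nat) : List (List Int) :=
  (List.range h).map (fun y => newRow board xp yp y w)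

def validAt (board piece : List (List Int)) (xp yp : Nat) : Bool :=
  check_location (sectionAt board xp yp piece.length (piece.headD []).length) piece

def rowPart (board piece : List (List Int)) (yp xp : Nat) : List (List Int) :=
  ((List.range' xp ((board.getD yp []).length + 1 - (piece.headD []).length - xp)).filter
      (fun x => validAt board piece x yp)).map (fun x => [(x : Int), (yp : Int)])

def rowsFrom (board piece : List (List Int)) (yp : Nat) : List (List Int) :=
  (List.range' yp (board.length + 1 - piece.length - yp)).flatMap (fun y => rowPart board piece y 0)

lemma aCell_nat (board : List (List Int)) (y x : Nat) :
    aCell board (y : Int) (x : Int) = cellN board y x := by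
  simp [aCell, cellN, PySem.List.pyGet?_natCast, List.getD_eq_getElem?_getD]

lemma bCell_nat (board : List (List Int)) (y x : Nat) :
    bCell board (y : Int) (x : Int) = cellN board y x := by
  simp [bCell, cellN, PySem.List.pyGet?_natCast, List.getD_eq_getElem?_getD]


lemma rowlen_eq (board : List (List Int)) (yp : Nat) :
    ((PySem.List.pyGet? board (yp : Int)).getD []).length = (board.getD yp []).length := by
  simp [PySem.List.pyGet?_natCast, List.getD_eq_getElem?_getD]

lemma rowfold (f : Nat → Int) (row : List Int) (n : Nat) (hn : n ≤ row.length) :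
    (List.range n).foldl (fun r x => r.set x (f x)) row = (List.range n).map f ++ row.drop n := by
  induction n with
  | zero => simp
  | succ n ih =>
    rw [List.range_succ, List.foldl_append, ih (by omega), List.map_append]
    rw [List.foldl_cons, List.foldl_nil, List.drop_eq_getElem_cons (by omega)]
    rw [show ((List.range n).map f ++ row[n] :: row.drop (n+1)).set n (f n)
        = (List.range n).map f ++ (row[n] :: row.drop (n+1)).set (n - ((List.range n).map f).length) (f n) from
      List.set_append_right _ _ (by simp)]
    simp
    rw [List.drop_eq_getElem_cons (show n < row.length by omega), List.set_cons_zero]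

lemma fold_set_row (y : Nat) (sec : List (List Int)) (hy : y < sec.length) (n : Nat) (f : Nat → Int) :
    (List.range n).foldl (fun s x => s.set y ((s.getD y []).set x (f x))) sec
      = sec.set y ((List.range n).foldl (fun r x => r.set x (f x)) (sec.getD y [])) := by
  induction n with
  | zero =>
    simp only [List.range_zero, List.foldl_nil]
    rw [List.getD_eq_getElem?_getD, List.getElem?_eq_getElem hy]
    simp
  | succ n ih =>
    rw [List.range_succ, List.foldl_append, ih, List.foldl_append]
    simp only [List.foldl_cons, List.foldl_nil]
    simp only [List.getD_eq_getElem?_getD]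
    simp [hy, List.set_set]

lemma copy_aux (board sec : List (List Int)) (xp yp : Nat) (w : Nat)
    (hw : ∀ r ∈ sec, r.length = w) :
    ∀ n, n ≤ sec.length →
    (List.range n).foldl (fun s y =>
      (List.range (s.getD y []).length).foldl (fun s x =>
        s.set y ((s.getD y []).set x (aCell board ((yp:Int) + y) ((xp:Int) + x)))) s) sec
      = (List.range n).map (fun y => newRow board xp yp y w) ++ sec.drop n := by
  intro n
  induction n with
  | zero => simp
  | succ n ih =>
    intro hn
    rw [List.range_succ, List.foldl_append, ih (by omega), List.foldl_cons, List.foldl_nil]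
    set P := (List.range n).map (fun y => newRow board xp yp y w) with hP
    have hPlen : P.length = n := by simp [hP]
    have hdrop : sec.drop n = sec[n] :: sec.drop (n+1) := List.drop_eq_getElem_cons (by omega)
    have hget : (P ++ sec.drop n).getD n [] = sec[n] := by
      rw [hdrop, List.getD_eq_getElem?_getD, List.getElem?_append_right (by omega), hPlen]
      simp [List.getElem?_eq_getElem (show n < sec.length from by omega)]
      rfl
    have hrowlen : sec[n].length = w := hw _ (List.getElem_mem (by omega))
    have hlen2 : (P ++ sec.drop n).length = sec.length := by
      rw [List.length_append, hPlen, List.length_drop]; omega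
    rw [hget, hrowlen, fold_set_row n _ (by rw [hlen2]; omega) w, hget]
    have hrf : (List.range w).foldl (fun r x => r.set x
          (aCell board ((yp:Int) + (n:Int)) ((xp:Int) + (x:Int)))) sec[n]
        = newRow board xp yp n w := by
      rw [rowfold _ _ _ (le_of_eq hrowlen.symm), List.drop_eq_nil_of_le (le_of_eq hrowlen),
          List.append_nil, newRow]
      apply List.map_congr_left
      intro x hx
      rw [show ((yp:Int) + (n:Int)) = ((yp + n : Nat) : Int) by push_cast; ring,
          show ((xp:Int) + (x:Int)) = ((xp + x : Nat) : Int) by push_cast; ring, aCell_nat]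
    rw [hrf, hdrop]
    rw [List.set_append_right _ _ (show P.length ≤ n by omega)]
    rw [hPlen, Nat.sub_self, List.set_cons_zero, List.map_append]
    simp [hP]

lemma copy_section_eq (board sec : List (List Int)) (xp yp : Nat) (w : Nat)
    (hw : ∀ r ∈ sec, r.length = w) :
    copy_section board sec (xp : Int) (yp : Int)
      = (List.range sec.length).map (fun y => newRow board xp yp y w) := by
  have := copy_aux board sec xp yp w hw sec.length (le_refl _)
  rw [copy_section, this, List.drop_length, List.append_nil]

lemma mem_piece_offsets (piece : List (List Int)) (o : Int × Int) :
    o ∈ piece_offsets piece ↔ ∃ (y : Nat) (hy : y < piece.length) (x : Nat) (hx : x < piece[y].length),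
      piece[y][x] = 1 ∧ o = ((y : Int), (x : Int)) := by
  simp only [piece_offsets, List.mem_flatMap, List.mem_filterMap, PySem.List.mem_enumerate_iff]
  constructor
  · rintro ⟨yr, ⟨y, hy, rfl⟩, xv, ⟨x, hx, rfl⟩, hv⟩
    simp only [beq_iff_eq] at hv
    split at hv
    · cases hv; exact ⟨y, hy, x, hx, by simpa using ‹piece[y][x] = 1›, by simp⟩
    · cases hv
  · rintro ⟨y, hy, x, hx, h1, rfl⟩
    exact ⟨(y, piece[y]), ⟨y, hy, by simp⟩, (x, piece[y][x]), ⟨x, hx, by simp⟩, by simp [h1]⟩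

lemma check_eq (board piece : List (List Int)) (xp yp : Nat)
    (hw : ∀ r ∈ piece, r.length ≤ (piece.headD []).length) :
    validAt board piece xp yp
      = (piece_offsets piece).all
          (fun o => bCell board ((yp : Int) + o.1) ((xp : Int) + o.2) != 1) := by
  have hpg : ∀ (y : Nat), y < piece.length → piece.getD y [] = piece[y]! := by
    intro y hy
    simp [List.getD_eq_getElem?_getD, List.getElem!_eq_getElem?_getD,
      List.getElem?_eq_getElem hy]
  have hsec : ∀ (y : Nat), y < piece.length →
      (sectionAt board xp yp piece.length (piece.headD []).length).getD y []
        = newRow board xp yp y (piece.headD []).length := by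
    intro y hy
    simp [sectionAt, List.getD_eq_getElem?_getD, hy]
  have hnr : ∀ (y x : Nat), x < (piece.headD []).length →
      (newRow board xp yp y (piece.headD []).length).getD x 0 = cellN board (yp+y) (xp+x) := by
    intro y x hx
    simp only [newRow, List.getD_eq_getElem?_getD, List.getElem?_map]
    rw [List.getElem?_range hx]
    simp
  have hbc : ∀ (y x : Nat), bCell board ((yp:Int) + (y:Int)) ((xp:Int) + (x:Int)) = cellN board (yp+y) (xp+x) := by
    intro y x
    rw [show ((yp:Int)+(y:Int)) = ((yp+y:Nat):Int) by push_cast; ring,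
        show ((xp:Int)+(x:Int)) = ((xp+x:Nat):Int) by push_cast; ring, bCell_nat]
  rw [Bool.eq_iff_iff]
  simp only [validAt, check_location, List.all_eq_true, List.mem_range, Bool.not_eq_eq_eq_not,
    Bool.not_true, Bool.and_eq_false_iff, beq_eq_false_iff_ne, ne_eq, bne_iff_ne]
  constructor
  · intro H o ho
    rw [mem_piece_offsets] at ho
    obtain ⟨y, hy, x, hx, h1, rfl⟩ := ho
    have hxw : x < (piece.headD []).length := lt_of_lt_of_le hx (hw _ (List.getElem_mem hy))
    have := H y hy x (by rw [hpg y hy, List.getElem!_eq_getElem?_getD, List.getElem?_eq_getElem hy]; simpa using hx)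
    rw [hpg y hy] at this
    rcases this with h | h
    · exfalso; apply h
      rw [List.getElem!_eq_getElem?_getD, List.getElem?_eq_getElem hy, Option.getD_some,
          List.getD_eq_getElem?_getD, List.getElem?_eq_getElem hx]
      exact h1
    · rw [hsec y hy, hnr y x hxw] at h
      rw [hbc y x]
      exact h
  · intro H y hy x hx
    rw [hpg y hy] at hx ⊢
    rw [hsec y hy]
    by_cases h1 : piece[y]!.getD x 0 = 1
    · right
      have hxl : x < piece[y].length := by
        rw [List.getElem!_eq_getElem?_getD, List.getElem?_eq_getElem hy] at hx; simpa using hx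
      have hxw : x < (piece.headD []).length := lt_of_lt_of_le hxl (hw _ (List.getElem_mem hy))
      have ho : ((y:Int), (x:Int)) ∈ piece_offsets piece := by
        rw [mem_piece_offsets]
        refine ⟨y, hy, x, hxl, ?_, rfl⟩
        rw [List.getElem!_eq_getElem?_getD, List.getElem?_eq_getElem hy, Option.getD_some,
            List.getD_eq_getElem?_getD, List.getElem?_eq_getElem hxl] at h1
        exact h1
      have := H _ ho
      rw [hbc y x] at this
      rw [hnr y x hxw]
      exact this
    · left; exact h1

lemma map_flat_single (l : List Nat) (k : Nat) :
    List.map (fun x : Int => [x, (k:Int)]) (List.flatMap (fun a : Nat => [((a:Int))]) l)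
      = List.map (fun x : Nat => [(x:Int), (k:Int)]) l := by
  induction l with
  | nil => rfl
  | cons a l ihl => simp_all

lemma placeLoop_stop (board piece : List (List Int)) (fuel : Nat) (xp yp : Int)
    (sec acc : List (List Int))
    (hc : ¬ (yp ≤ (board.length : Int) - piece.length ∧
        xp ≤ ((((PySem.List.pyGet? board yp).getD []).length : Int) - ((piece.headD []).length : Int)))) :
    placeLoop board piece fuel xp yp sec acc = acc := by
  cases fuel with
  | zero => rfl
  | succ fuel => rw [placeLoop, if_neg hc]

lemma placeLoop_eq (board piece : List (List Int)) (hne : piece ≠ [])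
    (hband : ∀ yp, yp + piece.length ≤ board.length →
      (piece.headD []).length ≤ (board.getD yp []).length) :
    ∀ (fuel : Nat) (xp yp : Nat) (sec acc : List (List Int)),
      (∀ r ∈ sec, r.length = (piece.headD []).length) → sec.length = piece.length →
      yp + piece.length ≤ board.length →
      xp + (piece.headD []).length ≤ (board.getD yp []).length →
      ((board.getD yp []).length + 1 - (piece.headD []).length - xp)
        + (board.length - piece.length - yp) * ((board.map List.length).sum + 2) ≤ fuel →
      placeLoop board piece fuel (xp : Int) (yp : Int) sec acc
        = acc ++ rowPart board piece yp xp ++ rowsFrom board piece (yp + 1) := by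
  have hh1 : 1 ≤ piece.length := List.length_pos_of_ne_nil hne
  have hWS : ∀ yp, yp < board.length → (board.getD yp []).length ≤ (board.map List.length).sum := by
    intro yp hyp
    rw [List.getD_eq_getElem?_getD, List.getElem?_eq_getElem hyp, Option.getD_some]
    exact List.single_le_sum (fun x _ => Nat.zero_le x) _
      (List.mem_map_of_mem (List.getElem_mem hyp))
  intro fuel
  induction fuel with
  | zero =>
    intro xp yp sec acc _ _ hyp hxp hfuel
    exfalso; omega
  | succ fuel ih =>
    intro xp yp sec acc hsecw hsecl hyp hxp hfuel
    have hypH : yp < board.length := by omega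
    have hrl := rowlen_eq board yp
    have hsec' : copy_section board sec (xp : Int) (yp : Int)
        = sectionAt board xp yp piece.length (piece.headD []).length := by
      rw [copy_section_eq board sec xp yp _ hsecw, hsecl]; rfl
    have hsecw' : ∀ r ∈ sectionAt board xp yp piece.length (piece.headD []).length,
        r.length = (piece.headD []).length := by
      intro r hr
      simp only [sectionAt, List.mem_map, List.mem_range] at hr
      obtain ⟨y, _, rfl⟩ := hr
      simp [newRow]
    have hsecl' : (sectionAt board xp yp piece.length (piece.headD []).length).length = piece.length := by
      simp [sectionAt]
    have hcheck : check_location (sectionAt board xp yp piece.length (piece.headD []).length) piece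
        = validAt board piece xp yp := rfl
    rw [placeLoop, if_pos ⟨by omega, by rw [hrl]; omega⟩]
    simp only [hsec', hcheck, hrl]
    by_cases hlast : xp + (piece.headD []).length = (board.getD yp []).length
    · rw [if_pos (by omega)]
      have hacc : (if validAt board piece xp yp then acc ++ [[(xp:Int), (yp:Int)]] else acc)
          = acc ++ rowPart board piece yp xp := by
        have hcnt : (board.getD yp []).length + 1 - (piece.headD []).length - xp = 1 := by omega
        rw [rowPart, hcnt]
        split <;> simp_all
      by_cases hmore : yp + 1 + piece.length ≤ board.length
      · have hband1 := hband (yp+1) (by omega)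
        have hS1 : (board.getD (yp+1) []).length ≤ (board.map List.length).sum :=
          hWS (yp+1) (by omega)
        have hsplit : (board.length - piece.length - yp) * ((board.map List.length).sum + 2)
            = ((board.map List.length).sum + 2)
              + (board.length - piece.length - (yp+1)) * ((board.map List.length).sum + 2) := by
          rw [show board.length - piece.length - yp = (board.length - piece.length - (yp+1)) + 1 by omega,
              Nat.succ_mul]
          ring
        rw [show ((yp:Int) + 1) = ((yp+1 : Nat) : Int) by push_cast; ring,
            show (0:Int) = ((0:Nat):Int) by simp]
        have harg3 : ((board.getD (yp+1) []).length + 1 - (piece.headD []).length)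
            + (board.length - piece.length - (yp+1)) * ((board.map List.length).sum + 2) ≤ fuel := by
          omega
        rw [ih 0 (yp+1) _ _ hsecw' hsecl' (by omega) (by omega) (by simpa using harg3)]
        have hrows : rowsFrom board piece (yp+1)
            = rowPart board piece (yp+1) 0 ++ rowsFrom board piece (yp+2) := by
          rw [rowsFrom, show board.length + 1 - piece.length - (yp+1)
                = (board.length - piece.length - (yp+1)) + 1 by omega, List.range'_succ,
              List.flatMap_cons, rowsFrom,
              show board.length - piece.length - (yp+1) = board.length + 1 - piece.length - (yp+1+1) from by omega]
        rw [hacc, hrows]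
        simp [List.append_assoc]
      · have hstop : placeLoop board piece fuel 0 ((yp:Int) + 1)
            (sectionAt board xp yp piece.length (piece.headD []).length)
            (if validAt board piece xp yp then acc ++ [[(xp:Int), (yp:Int)]] else acc)
            = (if validAt board piece xp yp then acc ++ [[(xp:Int), (yp:Int)]] else acc) := by
          apply placeLoop_stop
          rintro ⟨hc1, -⟩
          omega
        rw [hstop, hacc]
        have hnil : rowsFrom board piece (yp+1) = [] := by
          rw [rowsFrom, show board.length + 1 - piece.length - (yp+1) = 0 by omega]
          simp
        rw [hnil, List.append_nil]
    · rw [if_neg (by omega)]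
      rw [show ((xp:Int) + 1) = ((xp+1 : Nat) : Int) by push_cast; ring]
      rw [ih (xp+1) yp _ _ hsecw' hsecl' (by omega) (by omega) (by omega)]
      have hpart : rowPart board piece yp xp
          = (if validAt board piece xp yp then [[(xp:Int), (yp:Int)]] else [])
            ++ rowPart board piece yp (xp+1) := by
        rw [rowPart, rowPart, show (board.getD yp []).length + 1 - (piece.headD []).length - xp
              = ((board.getD yp []).length + 1 - (piece.headD []).length - (xp+1)) + 1 by omega,
            List.range'_succ, List.filter_cons]
        split <;> simp
      rw [hpart]
      split <;> simp [List.append_assoc]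

lemma alt_eq_rows (board piece : List (List Int)) (hne : piece ≠ [])
    (hwp : ∀ r ∈ piece, r.length ≤ (piece.headD []).length)
    (hband : ∀ yp, yp + piece.length ≤ board.length →
      (piece.headD []).length ≤ (board.getD yp []).length)
    (hh : piece.length ≤ board.length) :
    place_locations_alt board piece = rowsFrom board piece 0 := by
  have hh1 : 1 ≤ piece.length := List.length_pos_of_ne_nil hne
  simp only [place_locations_alt]
  rw [PySem.List.pyRange_one 0 ((board.length : Int) - piece.length + 1)]
  have htoNat : (((board.length : Int) - piece.length + 1) - 0).toNat = board.length + 1 - piece.length := by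
    omega
  rw [htoNat]
  rw [PySem.List.foldl_congr_mem _ _
    (fun (locs : List (List Int)) (ypi : Int) => locs ++ rowPart board piece ypi.toNat 0) _ ?_]
  · rw [PySem.List.foldl_append_eq_flatMap, List.nil_append, rowsFrom]
    rw [List.flatMap_map, show List.range' 0 (board.length + 1 - piece.length - 0)
          = List.range (board.length + 1 - piece.length) from by rw [List.range_eq_range']; rfl]
    apply List.flatMap_congr
    intro x hx
    simp
  · intro acc ypi hmem
    simp only [List.mem_map, List.mem_range] at hmem
    obtain ⟨k, hk, rfl⟩ := hmem
    have hband1 := hband k (by omega)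
    have hrl := rowlen_eq board k
    have h0k : ((0:Int) + (k:Nat)) = ((k:Nat):Int) := by simp
    rw [h0k, hrl]
    have hcnt : (((board.getD k []).length : Int) - ((piece.headD []).length:Int) + 1 - 0).toNat
        = (board.getD k []).length + 1 - (piece.headD []).length := by omega
    rw [PySem.List.pyRange_one 0, hcnt, List.foldl_map]
    rw [PySem.List.foldl_append_if (fun x : Nat =>
          (piece_offsets piece).all (fun o => bCell board (((k:Nat):Int) + o.1) (((0:Int) + (x:Nat)) + o.2) != 1))
        (fun x : Nat => [((0:Int) + (x:Nat)), ((k:Nat):Int)]) _ acc]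
    simp only [Int.toNat_natCast]
    rw [rowPart]
    congr 1
    rw [show (board.getD k []).length + 1 - (piece.headD []).length - 0
          = (board.getD k []).length + 1 - (piece.headD []).length from rfl,
        show List.range' 0 ((board.getD k []).length + 1 - (piece.headD []).length)
          = List.range ((board.getD k []).length + 1 - (piece.headD []).length) from by
        rw [List.range_eq_range']]
    have hfilt : ∀ x ∈ List.range ((board.getD k []).length + 1 - (piece.headD []).length),
        ((piece_offsets piece).all (fun o => bCell board (((k:Nat):Int) + o.1) (((0:Int) + (x:Nat)) + o.2) != 1))
          = validAt board piece x k := by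
      intro x hx
      rw [check_eq board piece x k hwp]
      simp
    rw [List.filter_congr hfilt]
    simp [zero_add]
    rw [map_flat_single]

lemma alt_eq_nil (board piece : List (List Int)) (hbad : board.length < piece.length) :
    place_locations_alt board piece = [] := by
  simp only [place_locations_alt]
  rw [PySem.List.pyRange_one_eq_nil (by omega)]
  rfl

-- ===== VERDICT (by name: the statement is the Claim_ definition above) =====
theorem place_locations_spec : Claim_equal_place_locations := by
  intro board piece _hdom hpre
  obtain ⟨hne, hwp, hrows⟩ := hpre
  have hh1 : 1 ≤ piece.length := List.length_pos_of_ne_nil hne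
  have hband : ∀ yp, yp + piece.length ≤ board.length →
      (piece.headD []).length ≤ (board.getD yp []).length := by
    intro yp hyp
    exact (hrows yp (by omega)).1
  show place_locations board piece = place_locations_alt board piece
  simp only [place_locations]
  by_cases hH : piece.length ≤ board.length
  · have hH1 : 1 ≤ board.length := by omega
    rw [alt_eq_rows board piece hne hwp hband hH]
    have hsecw : ∀ r ∈ (List.range piece.length).map
        (fun _ => (List.range (piece.headD []).length).map (fun _ => (0 : Int))),
        r.length = (piece.headD []).length := by
      intro r hr
      simp only [List.mem_map] at hr
      obtain ⟨y, _, rfl⟩ := hr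
      simp
    have hsecl : ((List.range piece.length).map
        (fun _ => (List.range (piece.headD []).length).map (fun _ => (0 : Int)))).length
          = piece.length := by simp
    have hband0 := hband 0 (by omega)
    have hW0S : (board.getD 0 []).length ≤ (board.map List.length).sum := by
      rw [List.getD_eq_getElem?_getD, List.getElem?_eq_getElem (by omega : 0 < board.length),
          Option.getD_some]
      exact List.single_le_sum (fun x _ => Nat.zero_le x) _
        (List.mem_map_of_mem (List.getElem_mem (by omega)))
    have heq : (board.length - piece.length - 0 + 1) * ((board.map List.length).sum + 2)
        = (board.length - piece.length - 0) * ((board.map List.length).sum + 2)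
          + ((board.map List.length).sum + 2) := Nat.succ_mul _ _
    have hmul : (board.length - piece.length - 0 + 1) * ((board.map List.length).sum + 2)
        ≤ (board.length + 1) * ((board.map List.length).sum + 2) :=
      Nat.mul_le_mul (by omega) (by omega)
    have hfuel : ((board.getD 0 []).length + 1 - (piece.headD []).length - 0)
        + (board.length - piece.length - 0) * ((board.map List.length).sum + 2)
        ≤ (board.length + 1) * ((board.map List.length).sum + 2) + 1 := by omega
    have hA := placeLoop_eq board piece hne hband
      ((board.length + 1) * ((board.map List.length).sum + 2) + 1) 0 0 _ [] hsecw hsecl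
      (by omega) (by omega) hfuel
    rw [Nat.cast_zero] at hA
    rw [hA]
    have hsplit0 : rowsFrom board piece 0
        = rowPart board piece 0 0 ++ rowsFrom board piece (0+1) := by
      rw [rowsFrom,
          show board.length + 1 - piece.length - 0
            = (board.length + 1 - piece.length - (0+1)) + 1 from by omega,
          List.range'_succ, List.flatMap_cons, rowsFrom]
    rw [List.nil_append, hsplit0]
  · rw [alt_eq_nil board piece (by omega)]
    apply placeLoop_stop
    rintro ⟨hc1, -⟩
    omega
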